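-- pv_equiv track=rewrite | github.com/siran/research | _drafts/On the Causality of Natural Numbers/era_order.py | power_cost
-- ===== SOURCE A (Python) =====
-- def power_cost(n: int) -> int:
--     """Least generator ceiling needed to realize n as a^b with b >= 1."""
--     best = n
--     max_b = n.bit_length() + 1
--     for b in range(2, max_b + 1):
--         lo = 2
--         hi = n
--         while lo <= hi:
--             mid = (lo + hi) // 2
--             value = mid**b
--             if value == n:
--                 best = min(best, max(mid, b))
--                 break
--             if value < n:
--                 lo = mid + 1
--             else:
--                 hi = mid - 1
--     return best
-- ===== SOURCE B (Python) =====
-- def power_cost(n: int) -> int: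
--     """Least generator ceiling needed to realize n as a^b with b >= 1."""
--     best = n
--     a = 2
--     while a * a <= n:
--         p = a * a
--         b = 2
--         while p <= n:
--             if p == n:
--                 c = max(a, b)
--                 if c < best:
--                     best = c
--             p *= a
--             b += 1
--         a += 1
--     return best
-- ===== Notes on version B (the rewrite author's own statement) =====
-- stated objective: alternative
-- what changed: Replaces the per-exponent binary search over bases by a direct enumeration of bases a with a*a <= n, maintaining a running power p = a^b in the inner loop, so no binary search and no bit_length bound are needed.
import Mathlib
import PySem

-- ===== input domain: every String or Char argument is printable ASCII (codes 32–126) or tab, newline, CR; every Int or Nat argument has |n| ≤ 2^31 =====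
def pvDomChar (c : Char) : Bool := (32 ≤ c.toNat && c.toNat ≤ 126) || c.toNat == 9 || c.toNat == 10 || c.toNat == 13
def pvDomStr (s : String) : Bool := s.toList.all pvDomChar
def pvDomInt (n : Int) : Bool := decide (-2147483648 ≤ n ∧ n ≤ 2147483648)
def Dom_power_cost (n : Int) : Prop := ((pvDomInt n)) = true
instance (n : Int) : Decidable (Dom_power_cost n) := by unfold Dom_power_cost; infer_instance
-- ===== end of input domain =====

-- B replaces A's per-exponent binary search over bases by direct base enumeration with a running power; alternative algorithm, same return value.


-- ===== PORT A =====
-- the inner 'while lo <= hi' binary search of A, totalized by a fuel guard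
-- (fuel only bounds the iteration count; power_cost supplies enough for every input)
def pvBsearchA : Nat → Int → Int → Int → Int → Int → Int
  | 0, _, _, _, _, best => best   -- fuel guard, never reached with the fuel power_cost supplies
  | fuel + 1, n, b, lo, hi, best =>
    if lo ≤ hi then
      -- mid = (lo + hi) // 2, written out at each use
      if PySem.Int.floordiv (lo + hi) 2 ^ b.toNat = n then
        min best (max (PySem.Int.floordiv (lo + hi) 2) b)   -- value == n: best = min(best, max(mid, b)); break
      else if PySem.Int.floordiv (lo + hi) 2 ^ b.toNat < n then
        pvBsearchA fuel n b (PySem.Int.floordiv (lo + hi) 2 + 1) hi best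
      else
        pvBsearchA fuel n b lo (PySem.Int.floordiv (lo + hi) 2 - 1) best
    else best

-- the 'for b in range(2, max_b + 1)' loop of A
def pvLoopA (n : Int) (bs : List Int) (best : Int) : Int :=
  match bs with
  | [] => best
  | b :: rest => pvLoopA n rest (pvBsearchA (n + 2).toNat n b 2 n best)

def power_cost (n : Int) : Int :=
  let max_b : Int := (PySem.Int.bitLength n : Int) + 1
  pvLoopA n (PySem.List.pyRange 2 (max_b + 1) 1) n

-- ===== PORT B =====
-- the inner 'while p <= n' loop of B, totalized by a fuel guard
def pvInnerB : Nat → Int → Int → Int → Int → Int → Int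
  | 0, _, _, _, _, best => best   -- fuel guard, never reached with the fuel power_cost_alt supplies
  | fuel + 1, n, a, p, b, best =>
    if p ≤ n then
      pvInnerB fuel n a (p * a) (b + 1)
        (if p = n then (if max a b < best then max a b else best) else best)
    else best

-- the outer 'while a * a <= n' loop of B
def pvOuterB : Nat → Int → Int → Int → Int
  | 0, _, _, best => best   -- fuel guard, never reached with the fuel power_cost_alt supplies
  | fuel + 1, n, a, best =>
    if a * a ≤ n then
      pvOuterB fuel n (a + 1) (pvInnerB (n + 1).toNat n a (a * a) 2 best)
    else best

def power_cost_alt (n : Int) : Int :=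
  pvOuterB (n + 1).toNat n 2 n

-- ===== PRECONDITION & SPEC =====
def Spec_power_cost (n : Int) (out : Int) : Prop := out = power_cost_alt n
instance (n : Int) (out : Int) : Decidable (Spec_power_cost n out) := by unfold Spec_power_cost; infer_instance

-- ===== CLAIM (what is proved, stated in full; the proofs are below) =====
def Claim_equal_power_cost : Prop := ∀ (n : Int), Dom_power_cost n → Spec_power_cost n (power_cost n)

-- ===== LEMMAS AND PROOFS =====

-- 'pvGood n v': v is either n itself or max a b for a genuine representation n = a^b (a,b ≥ 2)
def pvGood (n v : Int) : Prop :=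
  v = n ∨ ∃ a b : Int, 2 ≤ a ∧ 2 ≤ b ∧ a ^ b.toNat = n ∧ v = max a b

-- ---- A side: binary search ----
theorem bsA_le (fuel : Nat) (n b lo hi best : Int) :
    pvBsearchA fuel n b lo hi best ≤ best := by
  induction fuel generalizing lo hi with
  | zero => exact le_refl best
  | succ f ih =>
    rw [pvBsearchA]
    split_ifs
    · exact min_le_left _ _
    · exact ih _ _
    · exact ih _ _
    · exact le_refl best

theorem bsA_good (fuel : Nat) (n b lo hi best : Int) (hlo : 2 ≤ lo) (hb : 2 ≤ b)
    (hg : pvGood n best) : pvGood n (pvBsearchA fuel n b lo hi best) := by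
  induction fuel generalizing lo hi with
  | zero => exact hg
  | succ f ih =>
    rw [pvBsearchA]
    split_ifs with h h1 h2
    · have hmid := PySem.Int.floordiv_two_mid_bounds h
      rcases le_total best (max (PySem.Int.floordiv (lo + hi) 2) b) with hle | hle
      · rw [min_eq_left hle]; exact hg
      · rw [min_eq_right hle]
        exact Or.inr ⟨_, b, by omega, hb, h1, rfl⟩
    · have hmid := PySem.Int.floordiv_two_mid_bounds h
      exact ih _ _ (by omega)
    · exact ih _ _ hlo
    · exact hg

theorem bsA_complete (fuel : Nat) (n b lo hi best : Int) (hb : 1 ≤ b) (hlo : 0 ≤ lo)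
    (a : Int) (hrep : a ^ b.toNat = n) (hal : lo ≤ a) (har : a ≤ hi)
    (hfuel : (hi + 1 - lo).toNat < fuel) :
    pvBsearchA fuel n b lo hi best ≤ max a b := by
  induction fuel generalizing lo hi with
  | zero => omega
  | succ f ih =>
    have hl : lo ≤ hi := by omega
    rw [pvBsearchA, if_pos hl]
    have hmid := PySem.Int.floordiv_two_mid_bounds hl
    split_ifs with h1 h2
    · -- the found mid equals a, by strict monotonicity of x ↦ x^b on nonnegatives
      have hma : PySem.Int.floordiv (lo + hi) 2 = a := by
        by_contra hne
        have hbk : b.toNat ≠ 0 := by omega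
        rcases lt_or_gt_of_ne hne with hlt | hgt
        · have := pow_lt_pow_left₀ hlt (by omega : (0:Int) ≤ PySem.Int.floordiv (lo + hi) 2) hbk
          omega
        · have := pow_lt_pow_left₀ hgt (by omega : (0:Int) ≤ a) hbk
          omega
      calc min best (max (PySem.Int.floordiv (lo + hi) 2) b)
          ≤ max (PySem.Int.floordiv (lo + hi) 2) b := min_le_right _ _
        _ = max a b := by rw [hma]
    · have hmida : PySem.Int.floordiv (lo + hi) 2 < a := by
        by_contra hc
        have := pow_le_pow_left₀ (by omega : (0:Int) ≤ a) (le_of_not_gt hc) b.toNat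
        omega
      exact ih (PySem.Int.floordiv (lo + hi) 2 + 1) hi (by omega) (by omega) har (by omega)
    · have hamid : a < PySem.Int.floordiv (lo + hi) 2 := by
        by_contra hc
        have := pow_le_pow_left₀ (by omega : (0:Int) ≤ PySem.Int.floordiv (lo + hi) 2)
          (le_of_not_gt hc) b.toNat
        omega
      exact ih lo (PySem.Int.floordiv (lo + hi) 2 - 1) hlo hal (by omega) (by omega)

-- ---- A side: the exponent loop ----
theorem loopA_le (n : Int) (bs : List Int) (best : Int) :
    pvLoopA n bs best ≤ best := by
  induction bs generalizing best with
  | nil => exact le_refl best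
  | cons b rest ih =>
    exact le_trans (ih _) (bsA_le ..)

theorem loopA_good (n : Int) (bs : List Int) (best : Int)
    (hbs : ∀ b ∈ bs, 2 ≤ b) (hg : pvGood n best) : pvGood n (pvLoopA n bs best) := by
  induction bs generalizing best with
  | nil => exact hg
  | cons b rest ih =>
    exact ih _ (fun x hx => hbs x (List.mem_cons_of_mem _ hx))
      (bsA_good _ _ _ _ _ _ (by omega) (hbs b (List.mem_cons_self ..)) hg)

theorem loopA_complete (n : Int) (bs : List Int) (best : Int)
    (a b : Int) (hb : 1 ≤ b) (hmem : b ∈ bs) (hal : 2 ≤ a) (har : a ≤ n)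
    (hrep : a ^ b.toNat = n) : pvLoopA n bs best ≤ max a b := by
  induction bs generalizing best with
  | nil => cases hmem
  | cons b' rest ih =>
    rcases List.mem_cons.mp hmem with rfl | hmem'
    · exact le_trans (loopA_le n rest _)
        (bsA_complete (n + 2).toNat n b 2 n best hb (by omega) a hrep hal har (by omega))
    · exact ih _ hmem'

-- representations force size bounds
theorem rep_base_le (n a b : Int) (ha : 2 ≤ a) (hb : 2 ≤ b) (hrep : a ^ b.toNat = n) :
    a ≤ n := by
  calc a = a ^ 1 := (pow_one a).symm
    _ ≤ a ^ b.toNat := pow_le_pow_right₀ (by omega) (by omega)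
    _ = n := hrep

theorem rep_exp_le (n a b : Int) (ha : 2 ≤ a) (hb : 2 ≤ b) (hrep : a ^ b.toNat = n) :
    b ≤ (PySem.Int.bitLength n : Int) := by
  have h2 : (2:Int) ^ b.toNat ≤ n := hrep ▸ pow_le_pow_left₀ (by omega) ha b.toNat
  have hnat : 2 ^ b.toNat ≤ n.natAbs := by
    have h0 : (0:Int) < 2 ^ b.toNat := by positivity
    have : ((2:Nat) ^ b.toNat : Int) ≤ n := by push_cast; exact h2
    omega
  have hsz : n.natAbs < 2 ^ PySem.Int.bitLength n := PySem.Int.lt_two_pow_bitLength n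
  have : b.toNat < PySem.Int.bitLength n :=
    (Nat.pow_lt_pow_iff_right (by norm_num : 1 < 2)).mp (by omega)
  omega

-- A-side characterization
theorem A_le (n : Int) : power_cost n ≤ n := loopA_le ..

theorem A_good (n : Int) : pvGood n (power_cost n) := by
  unfold power_cost
  exact loopA_good _ _ _ (fun b hb => ((PySem.List.mem_pyRange_one).mp hb).1) (Or.inl rfl)

theorem A_complete (n a b : Int) (ha : 2 ≤ a) (hb : 2 ≤ b) (hrep : a ^ b.toNat = n) :
    power_cost n ≤ max a b := by
  unfold power_cost
  refine loopA_complete n _ n a b (by omega) ?_ ha (rep_base_le n a b ha hb hrep) hrep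
  refine (PySem.List.mem_pyRange_one).mpr ⟨hb, ?_⟩
  have := rep_exp_le n a b ha hb hrep
  omega

-- ---- B side: inner loop ----
theorem innerB_le (fuel : Nat) (n a p b best : Int) :
    pvInnerB fuel n a p b best ≤ best := by
  induction fuel generalizing p b best with
  | zero => exact le_refl best
  | succ f ih =>
    rw [pvInnerB]
    by_cases h : p ≤ n
    · rw [if_pos h]
      refine le_trans (ih _ _ _) ?_
      split_ifs <;> omega
    · rw [if_neg h]

theorem innerB_good (fuel : Nat) (n a p b best : Int) (ha : 2 ≤ a)
    (hb : 2 ≤ b) (hP : a ^ b.toNat = p) (hg : pvGood n best) :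
    pvGood n (pvInnerB fuel n a p b best) := by
  induction fuel generalizing p b best with
  | zero => exact hg
  | succ f ih =>
    rw [pvInnerB]
    by_cases h : p ≤ n
    · rw [if_pos h]
      refine ih _ _ _ (by omega) ?_ ?_
      · have h1 : (b + 1).toNat = b.toNat + 1 := by omega
        rw [h1, pow_succ, hP]
      · split_ifs with h1 h2
        · exact Or.inr ⟨a, b, ha, hb, by rw [hP, h1], rfl⟩
        · exact hg
        · exact hg
    · rw [if_neg h]; exact hg

theorem innerB_complete (fuel : Nat) (n a p b best : Int) (ha : 2 ≤ a) (hp : 1 ≤ p)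
    (b' : Int) (hb : 2 ≤ b) (hP : a ^ b.toNat = p)
    (hbb : b ≤ b') (hrep : a ^ b'.toNat = n)
    (hfuel : (n + 1 - p).toNat < fuel) :
    pvInnerB fuel n a p b best ≤ max a b' := by
  induction fuel generalizing p b best with
  | zero => omega
  | succ f ih =>
    have hpn' : p ≤ n := by
      rw [← hP, ← hrep]
      exact pow_le_pow_right₀ (by omega) (by omega)
    rw [pvInnerB, if_pos hpn']
    rcases eq_or_lt_of_le hbb with rfl | hlt
    · -- this is the hit: p = n, so the updated best is ≤ max a b and the rest only shrinks
      have hpn : p = n := by rw [← hP, hrep]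
      refine le_trans (innerB_le ..) ?_
      rw [if_pos hpn]
      split_ifs <;> omega
    · have h2 : p * 2 ≤ p * a := mul_le_mul_of_nonneg_left ha (by omega)
      refine ih _ _ _ (by omega) (by omega) ?_ (by omega) (by omega)
      have h1 : (b + 1).toNat = b.toNat + 1 := by omega
      rw [h1, pow_succ, hP]

-- ---- B side: outer loop ----
theorem outerB_le (fuel : Nat) (n a best : Int) :
    pvOuterB fuel n a best ≤ best := by
  induction fuel generalizing a best with
  | zero => exact le_refl best
  | succ f ih =>
    rw [pvOuterB]
    split_ifs with h
    · exact le_trans (ih _ _) (innerB_le ..)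
    · exact le_refl best

theorem outerB_good (fuel : Nat) (n a best : Int) (ha : 2 ≤ a) (hg : pvGood n best) :
    pvGood n (pvOuterB fuel n a best) := by
  induction fuel generalizing a best with
  | zero => exact hg
  | succ f ih =>
    rw [pvOuterB]
    split_ifs with h
    · exact ih _ _ (by omega) (innerB_good _ n a (a * a) 2 best ha (by omega) (by exact pow_two a) hg)
    · exact hg

theorem outerB_complete (fuel : Nat) (n a best : Int) (ha : 2 ≤ a)
    (a' b' : Int) (haa : a ≤ a') (hb' : 2 ≤ b') (hrep : a' ^ b'.toNat = n)
    (hfuel : (n - a).toNat < fuel) :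
    pvOuterB fuel n a best ≤ max a' b' := by
  induction fuel generalizing a best with
  | zero => omega
  | succ f ih =>
    have hsq : a * a ≤ n := by
      have h1 : a * a ≤ a' * a' := mul_le_mul haa haa (by omega) (by omega)
      have h2 : a' * a' ≤ a' ^ b'.toNat := by
        calc a' * a' = a' ^ 2 := (pow_two a').symm
          _ ≤ a' ^ b'.toNat := pow_le_pow_right₀ (by omega) (by omega)
      omega
    rw [pvOuterB, if_pos hsq]
    have h4 : 2 * 2 ≤ a * a := mul_le_mul ha ha (by omega) (by omega)
    have h5 : a * 2 ≤ a * a := mul_le_mul_of_nonneg_left ha (by omega)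
    rcases eq_or_lt_of_le haa with rfl | hlt
    · exact le_trans (outerB_le ..)
        (innerB_complete (n + 1).toNat n a (a * a) 2 best ha (by omega) b'
          (by omega) (by exact pow_two a) hb' hrep (by omega))
    · exact ih _ _ (by omega) (by omega) (by omega)

-- B-side characterization
theorem B_le (n : Int) : power_cost_alt n ≤ n := outerB_le ..

theorem B_good (n : Int) : pvGood n (power_cost_alt n) :=
  outerB_good _ n 2 n (by omega) (Or.inl rfl)

theorem B_complete (n a b : Int) (ha : 2 ≤ a) (hb : 2 ≤ b) (hrep : a ^ b.toNat = n) :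
    power_cost_alt n ≤ max a b := by
  have han := rep_base_le n a b ha hb hrep
  exact outerB_complete (n + 1).toNat n 2 n (by omega) a b ha hb hrep (by omega)

-- ===== VERDICT (by name: the statement is the Claim_ definition above) =====
theorem power_cost_spec : Claim_equal_power_cost := by
  intro n _
  unfold Spec_power_cost
  refine le_antisymm ?_ ?_
  · rcases B_good n with hB | ⟨a, b, ha, hb, hrep, hv⟩
    · rw [hB]; exact A_le n
    · rw [hv]; exact A_complete n a b ha hb hrep
  · rcases A_good n with hA | ⟨a, b, ha, hb, hrep, hv⟩
    · rw [hA]; exact B_le n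
    · rw [hv]; exact B_complete n a b ha hb hrep
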